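-- pv_equiv track=rewrite | github.com/inon-peled/advent_of_code | y2017/d17/part1.py | solve
-- ===== SOURCE A (Python) =====
-- from collections import deque
--
-- def solve(insertions, forward):
--     q = deque([0])
--     for i in range(1, insertions + 1):
--         q.rotate(-forward)
--         head = q.popleft()
--         q.appendleft(i)
--         q.append(head)
--         pass
--     q.popleft()
--     answer = q.popleft()
--     return answer
-- ===== SOURCE B (Python) =====
-- def solve(insertions, forward):
--     buf = [0]
--     p = 0
--     for i in range(1, insertions + 1):
--         p = (p + forward) % i + 1
--         buf.insert(p, i)
--     return buf[(p + 1) % len(buf)]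
-- ===== Notes on version B (the rewrite author's own statement) =====
-- stated objective: alternative
-- what changed: Replaces the deque simulation (rotate the whole deque by `forward` each step, pop/append to move the head) by the classic spinlock formulation: a flat list plus an arithmetic position pointer p = (p + forward) % i + 1 with a single list.insert per step and a direct indexed read at the end.
import Mathlib
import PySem

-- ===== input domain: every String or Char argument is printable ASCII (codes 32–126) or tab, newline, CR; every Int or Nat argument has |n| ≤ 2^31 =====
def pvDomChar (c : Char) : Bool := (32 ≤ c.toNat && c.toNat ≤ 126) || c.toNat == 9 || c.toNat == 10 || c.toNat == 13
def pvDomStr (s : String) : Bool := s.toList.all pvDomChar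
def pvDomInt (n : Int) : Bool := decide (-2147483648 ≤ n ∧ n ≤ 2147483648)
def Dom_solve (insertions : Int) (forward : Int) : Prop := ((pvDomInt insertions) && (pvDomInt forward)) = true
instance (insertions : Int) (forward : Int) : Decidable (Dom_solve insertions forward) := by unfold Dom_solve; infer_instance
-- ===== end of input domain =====

-- B replaces A's deque-rotation simulation by a flat list with an arithmetic position
-- pointer (insert at (p+forward)%i+1 each step), a structurally different algorithm.

-- ===== PORT A =====
-- one loop body: q.rotate(-forward); head = q.popleft(); q.appendleft(i); q.append(head)
-- deque.rotate(-forward) on a nonempty deque of length L is a LEFT rotation by (forward mod L)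
-- (Python floor mod, so the rotation count is in [0, L)); q is never empty inside the loop.
def stepA (forward : Int) (q : List Int) (i : Int) : List Int :=
  let k : Nat := (PySem.Int.mod forward (q.length : Int)).toNat
  let q1 := q.drop k ++ q.take k
  match q1 with
  | [] => []            -- unreachable: q is nonempty in every call
  | h :: t => i :: (t ++ [h])

def solve (insertions : Int) (forward : Int) : Int :=
  -- q.popleft(); answer = q.popleft()  = q[1]; none = IndexError, excluded by Pre_solve
  (PySem.List.pyGet? ((PySem.List.pyRange 1 (insertions + 1) 1).foldl (stepA forward) [0]) 1).getD 0

-- ===== PORT B =====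
-- loop body of Source B: p = (p + forward) % i + 1; buf.insert(p, i)
def stepB (forward : Int) (s : List Int × Int) (i : Int) : List Int × Int :=
  let p := PySem.Int.mod (s.2 + forward) i + 1
  (PySem.List.insert s.1 p i, p)

-- the loop of Source B: (buf, p) after all insertions
def runB (insertions : Int) (forward : Int) : List Int × Int :=
  (PySem.List.pyRange 1 (insertions + 1) 1).foldl (stepB forward) ([0], 0)

def solve_alt (insertions : Int) (forward : Int) : Int :=
  -- return buf[(p + 1) % len(buf)]; the index is always in range (buf is nonempty)
  (PySem.List.pyGet? (runB insertions forward).1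
    (PySem.Int.mod ((runB insertions forward).2 + 1) ((runB insertions forward).1.length : Int))).getD 0

-- ===== PRECONDITION & SPEC =====
-- Pre_ excludes insertions ≤ 0, where A's final two popleft() calls hit a 1-element deque
-- and raise IndexError.
def Pre_solve (insertions : Int) (forward : Int) : Prop := 1 ≤ insertions
instance (insertions : Int) (forward : Int) : Decidable (Pre_solve insertions forward) := by unfold Pre_solve; infer_instance
def pvWitness_solve : Int × Int := (5, 3)

def Spec_solve (insertions : Int) (forward : Int) (out : Int) : Prop := out = solve_alt insertions forward
instance (insertions : Int) (forward : Int) (out : Int) : Decidable (Spec_solve insertions forward out) := by unfold Spec_solve; infer_instance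

-- ===== CLAIM (what is proved, stated in full; the proofs are below) =====
def Claim_equal_solve : Prop := ∀ (insertions : Int) (forward : Int), Dom_solve insertions forward → Pre_solve insertions forward → Spec_solve insertions forward (solve insertions forward)

-- ===== LEMMAS AND PROOFS =====

-- One step preserves the invariant: A's deque equals B's buffer rotated left by B's pointer.
theorem step_inv (forward : Int) (buf : List Int) (p : Int) (n : Nat)
    (hlen : buf.length = n + 1) (hp0 : 0 ≤ p) (hpn : p ≤ (n : Int)) :
    stepA forward (buf.rotate p.toNat) ((n : Int) + 1)
      = (stepB forward (buf, p) ((n : Int) + 1)).1.rotate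
          ((stepB forward (buf, p) ((n : Int) + 1)).2.toNat)
    ∧ (stepB forward (buf, p) ((n : Int) + 1)).1.length = n + 2
    ∧ 0 ≤ (stepB forward (buf, p) ((n : Int) + 1)).2
    ∧ (stepB forward (buf, p) ((n : Int) + 1)).2 ≤ (n : Int) + 1 := by
  have hpos : (0 : Int) < (n : Int) + 1 := by positivity
  -- the three modular quantities
  set k : Nat := (PySem.Int.mod forward ((n : Int) + 1)).toNat with hk
  set m : Nat := (PySem.Int.mod (p + forward) ((n : Int) + 1)).toNat with hm
  have hkmod : PySem.Int.mod forward ((n : Int) + 1) = (k : Int) := by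
    rw [hk, Int.toNat_of_nonneg (PySem.Int.mod_nonneg _ hpos)]
  have hklt : k < n + 1 := by
    have := PySem.Int.mod_lt forward hpos
    omega
  have hmmod : PySem.Int.mod (p + forward) ((n : Int) + 1) = (m : Int) := by
    rw [hm, Int.toNat_of_nonneg (PySem.Int.mod_nonneg _ hpos)]
  have hmlt : m < n + 1 := by
    have := PySem.Int.mod_lt (p + forward) hpos
    omega
  -- m = (p.toNat + k) % (n+1)
  have hptn : p = (p.toNat : Int) := (Int.toNat_of_nonneg hp0).symm
  have harith : m = (p.toNat + k) % (n + 1) := by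
    have h1 : PySem.Int.mod (p + forward) ((n : Int) + 1) = (p + forward) % ((n : Int) + 1) :=
      PySem.Int.mod_eq_emod_of_pos hpos
    have h2 : PySem.Int.mod forward ((n : Int) + 1) = forward % ((n : Int) + 1) :=
      PySem.Int.mod_eq_emod_of_pos hpos
    have hkself : ((k : Int)) % ((n : Int) + 1) = (k : Int) :=
      Int.emod_eq_of_lt (by positivity) (by exact_mod_cast hklt)
    have h3 : (p + forward) % ((n : Int) + 1) = (p + (k : Int)) % ((n : Int) + 1) := by
      conv_lhs => rw [Int.add_emod]
      conv_rhs => rw [Int.add_emod]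
      rw [← h2, hkmod, hkself]
    have h4 : ((((p.toNat + k : Nat) : Int)) % (((n + 1 : Nat) : Int))) = (((p.toNat + k) % (n + 1) : Nat) : Int) := by
      exact_mod_cast (Int.natCast_mod (p.toNat + k) (n + 1)).symm
    have : (m : Int) = (((p.toNat + k) % (n + 1) : Nat) : Int) := by
      rw [← hmmod, h1, h3, hptn]
      push_cast at h4 ⊢
      exact h4
    exact_mod_cast this
  have hbufne : buf ≠ [] := by intro h; simp [h] at hlen
  -- unfold stepB
  have hstepB : stepB forward (buf, p) ((n : Int) + 1)
      = (PySem.List.insert buf ((m : Int) + 1) ((n : Int) + 1), (m : Int) + 1) := by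
    simp only [stepB, hmmod]
  rw [hstepB]
  have hins : PySem.List.insert buf ((m : Int) + 1) ((n : Int) + 1)
      = buf.take (m + 1) ++ ((n : Int) + 1) :: buf.drop (m + 1) := by
    have : ((m : Int) + 1) = ((m + 1 : Nat) : Int) := by push_cast; ring
    rw [this, PySem.List.insert_natCast buf (m + 1) _ (by omega)]
  -- LHS: compute stepA on the rotated buffer
  have hlrot : (buf.rotate p.toNat).length = n + 1 := by simp [hlen]
  have hkA : (PySem.Int.mod forward (((buf.rotate p.toNat).length : Nat) : Int)).toNat = k := by
    rw [hlrot]; push_cast; rfl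
  have hq1 : (buf.rotate p.toNat).drop k ++ (buf.rotate p.toNat).take k
      = buf.rotate (p.toNat + k) := by
    rw [← List.rotate_eq_drop_append_take (by omega), List.rotate_rotate]
  -- buf.rotate (p.toNat + k) = buf.rotate m  (rotate counts agree mod length)
  have hrotm : buf.rotate (p.toNat + k) = buf.rotate m := by
    rw [← List.rotate_mod buf (p.toNat + k), ← List.rotate_mod buf m, hlen, harith,
      Nat.mod_mod_of_dvd _ (dvd_refl _)]
  have hmlen : m ≤ buf.length := by omega
  have hrot_split : buf.rotate m = buf.drop m ++ buf.take m :=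
    List.rotate_eq_drop_append_take hmlen
  have hdropne : buf.drop m ≠ [] := by
    intro h
    have := List.length_drop (l := buf) (i := m)
    rw [h] at this; simp at this; omega
  obtain ⟨h0, t0, hht⟩ : ∃ h0 t0, buf.drop m = h0 :: t0 := by
    cases hbd : buf.drop m with
    | nil => exact absurd hbd hdropne
    | cons a l => exact ⟨a, l, rfl⟩
  constructor
  · -- the rotation equation
    show stepA forward (buf.rotate p.toNat) ((n : Int) + 1) = _
    simp only [stepA, hkA, hq1, hrotm, hrot_split, hht]
    -- LHS is now: match (h0 :: (t0 ++ buf.take m)) with …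
    show ((n : Int) + 1) :: ((t0 ++ buf.take m) ++ [h0]) = _
    -- RHS: rotate the inserted buffer by m+1
    have hlen' : (PySem.List.insert buf ((m : Int) + 1) ((n : Int) + 1)).length = n + 2 := by
      rw [hins]; simp; omega
    have htn : ((m : Int) + 1).toNat = m + 1 := by omega
    rw [htn, hins, List.rotate_eq_drop_append_take (by simp; omega)]
    have htklen : (buf.take (m + 1)).length = m + 1 := by simp; omega
    have hdrop' : (buf.take (m + 1) ++ ((n : Int) + 1) :: buf.drop (m + 1)).drop (m + 1)
        = ((n : Int) + 1) :: buf.drop (m + 1) := by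
      rw [List.drop_append_of_le_length (by omega)]
      simp
    have htake' : (buf.take (m + 1) ++ ((n : Int) + 1) :: buf.drop (m + 1)).take (m + 1)
        = buf.take (m + 1) := by
      rw [List.take_append_of_le_length (by omega)]
      simp
    rw [hdrop', htake']
    -- goal: (n+1) :: ((t0 ++ buf.take m) ++ [h0]) = ((n+1) :: buf.drop (m+1)) ++ buf.take (m+1)
    have hsucc : buf.drop (m + 1) ++ buf.take (m + 1) = t0 ++ buf.take m ++ [h0] := by
      have h2 : buf.rotate (m + 1) = ((h0 :: (t0 ++ buf.take m))).rotate 1 := by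
        rw [← List.rotate_rotate, hrot_split, hht]; rfl
      have h3 : ((h0 :: (t0 ++ buf.take m))).rotate 1 = (t0 ++ buf.take m) ++ [h0] := by
        simpa using List.rotate_cons_succ (t0 ++ buf.take m) h0 0
      rw [← List.rotate_eq_drop_append_take (by omega), h2, h3]
    simp only [List.cons_append, hsucc]
  · refine ⟨?_, by positivity, by omega⟩
    rw [hins]; simp; omega

-- Loop invariant over the whole range 1..n.
theorem loop_inv (forward : Int) (n : Nat) :
    ((PySem.List.pyRange 1 ((n : Int) + 1) 1).foldl (stepA forward) [0])
      = ((PySem.List.pyRange 1 ((n : Int) + 1) 1).foldl (stepB forward) ([0], 0)).1.rotate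
          ((PySem.List.pyRange 1 ((n : Int) + 1) 1).foldl (stepB forward) ([0], 0)).2.toNat
    ∧ ((PySem.List.pyRange 1 ((n : Int) + 1) 1).foldl (stepB forward) ([0], 0)).1.length = n + 1
    ∧ 0 ≤ ((PySem.List.pyRange 1 ((n : Int) + 1) 1).foldl (stepB forward) ([0], 0)).2
    ∧ ((PySem.List.pyRange 1 ((n : Int) + 1) 1).foldl (stepB forward) ([0], 0)).2 ≤ (n : Int) := by
  induction n with
  | zero =>
    rw [PySem.List.pyRange_one_eq_nil (by norm_num)]
    simp [List.rotate]
  | succ n ih =>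
    have hsplit : PySem.List.pyRange 1 (((n + 1 : Nat) : Int) + 1) 1
        = PySem.List.pyRange 1 ((n : Int) + 1) 1 ++ [(n : Int) + 1] := by
      have : (((n + 1 : Nat) : Int) + 1) = ((n : Int) + 1) + 1 := by push_cast; ring
      rw [this, PySem.List.pyRange_one_succ_right (by omega)]
    obtain ⟨hrot, hlen, hp0, hpn⟩ := ih
    set s := (PySem.List.pyRange 1 ((n : Int) + 1) 1).foldl (stepB forward) ([0], 0) with hs
    have hstep := step_inv forward s.1 s.2 n hlen hp0 hpn
    rw [hsplit, List.foldl_append, List.foldl_append]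
    simp only [List.foldl_cons, List.foldl_nil, ← hs]
    rw [hrot]
    exact ⟨hstep.1, hstep.2.1, hstep.2.2.1, by push_cast; exact hstep.2.2.2⟩

-- Final extraction: A's q[1] is B's buf[(p+1) % len].
theorem solve_eq_alt (insertions forward : Int) (h1 : 1 ≤ insertions) :
    solve insertions forward = solve_alt insertions forward := by
  obtain ⟨n, hn⟩ : ∃ n : Nat, insertions = (n : Int) :=
    ⟨insertions.toNat, (Int.toNat_of_nonneg (by omega)).symm⟩
  subst hn
  obtain ⟨hrot, hlen, hp0, hpn⟩ := loop_inv forward n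
  have hrunB : runB (n : Int) forward
      = (PySem.List.pyRange 1 ((n : Int) + 1) 1).foldl (stepB forward) ([0], 0) := rfl
  rw [← hrunB] at hrot hlen hp0 hpn
  set s := runB (n : Int) forward with hs
  set t : Nat := s.2.toNat with ht
  have htn : t ≤ n := by omega
  have hLpos : 0 < s.1.length := by omega
  unfold solve
  unfold solve_alt
  rw [hrot]
  -- A side: (buf.rotate t)[1]
  have h1lt : 1 < (s.1.rotate t).length := by
    have hn1 : 1 ≤ n := by exact_mod_cast h1
    simp [hlen]; omega
  have hA : PySem.List.pyGet? (s.1.rotate t) 1 = some ((s.1.rotate t)[1]'h1lt) := by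
    rw [show (1 : Int) = ((1 : Nat) : Int) from rfl, PySem.List.pyGet?_natCast]
    exact List.getElem?_eq_getElem h1lt
  have hAval : (s.1.rotate t)[1]'h1lt = s.1[(1 + t) % s.1.length]'(Nat.mod_lt _ hLpos) :=
    List.getElem_rotate s.1 t 1 h1lt
  -- B side: buf[(p+1) % len]
  have hpos : (0 : Int) < ((n + 1 : Nat) : Int) := by positivity
  have hmod : PySem.Int.mod (s.2 + 1) ((s.1.length : Nat) : Int)
      = (((t + 1) % (n + 1) : Nat) : Int) := by
    rw [hlen]
    have hp : s.2 = (t : Int) := by omega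
    rw [PySem.Int.mod_eq_emod_of_pos hpos, hp]
    exact_mod_cast (Int.natCast_mod (t + 1) (n + 1)).symm
  have hmlt : (t + 1) % (n + 1) < s.1.length := by
    have := Nat.mod_lt (t + 1) (y := n + 1) (by omega); omega
  have hB : PySem.List.pyGet? s.1 (PySem.Int.mod (s.2 + 1) ((s.1.length : Nat) : Int))
      = some (s.1[(t + 1) % (n + 1)]'hmlt) := by
    rw [hmod, PySem.List.pyGet?_natCast]
    exact List.getElem?_eq_getElem hmlt
  rw [hA, hB, Option.getD_some, Option.getD_some, hAval]
  congr 1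
  rw [hlen, Nat.add_comm]

-- ===== VERDICT (by name: the statement is the Claim_ definition above) =====
theorem solve_spec : Claim_equal_solve := by
  intro insertions forward _ hpre
  exact solve_eq_alt insertions forward hpre
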